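-- pv_equiv track=rewrite | github.com/Jake-1226/Project-Medi-AI-tor | core/analytics_engine.py | _get_metric_category
-- ===== SOURCE A (Python) =====
-- from enum import Enum
--
-- class MetricType(str, Enum):
--     PERFORMANCE = "performance"
--     AVAILABILITY = "availability"
--     HEALTH = "health"
--     MAINTENANCE = "maintenance"
--     SECURITY = "security"
--     COST = "cost"
--
-- def _get_metric_category(metric_name: str) -> MetricType:
--     """Determine metric category from name"""
--     name_lower = metric_name.lower()
--
--     if any(keyword in name_lower for keyword in ["cpu", "memory", "performance", "response"]):
--         return MetricType.PERFORMANCE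
--     elif any(keyword in name_lower for keyword in ["uptime", "availability", "downtime"]):
--         return MetricType.AVAILABILITY
--     elif any(keyword in name_lower for keyword in ["health", "temperature", "error", "warning"]):
--         return MetricType.HEALTH
--     elif any(keyword in name_lower for keyword in ["maintenance", "repair", "service"]):
--         return MetricType.MAINTENANCE
--     elif any(keyword in name_lower for keyword in ["security", "auth", "login"]):
--         return MetricType.SECURITY
--     elif any(keyword in name_lower for keyword in ["cost", "budget", "expense"]):
--         return MetricType.COST
--     else:
--         return MetricType.PERFORMANCE  # Default
-- ===== SOURCE B (Python) =====
-- from enum import Enum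
--
-- class MetricType(str, Enum):
--     PERFORMANCE = "performance"
--     AVAILABILITY = "availability"
--     HEALTH = "health"
--     MAINTENANCE = "maintenance"
--     SECURITY = "security"
--     COST = "cost"
--
-- _CATEGORIES = (MetricType.PERFORMANCE, MetricType.AVAILABILITY, MetricType.HEALTH,
--                MetricType.MAINTENANCE, MetricType.SECURITY, MetricType.COST)
--
-- _KEYWORD_RANKS = (
--     ("cpu", 0), ("memory", 0), ("performance", 0), ("response", 0),
--     ("uptime", 1), ("availability", 1), ("downtime", 1),
--     ("health", 2), ("temperature", 2), ("error", 2), ("warning", 2),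
--     ("maintenance", 3), ("repair", 3), ("service", 3),
--     ("security", 4), ("auth", 4), ("login", 4),
--     ("cost", 5), ("budget", 5), ("expense", 5),
-- )
--
-- def _get_metric_category(metric_name: str) -> MetricType:
--     """Single left-to-right scan over the name: at each position note which
--     keywords start there and keep the minimum category rank seen; the minimum
--     rank is exactly the highest-priority matching category (default rank 0)."""
--     s = metric_name.lower()
--     best = None
--     for i in range(len(s)):
--         for kw, rank in _KEYWORD_RANKS:
--             if s.startswith(kw, i) and (best is None or rank < best):
--                 best = rank
--     return _CATEGORIES[best if best is not None else 0]
-- ===== Notes on version B (the rewrite author's own statement) =====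
-- stated objective: alternative
-- what changed: Instead of testing the six categories in priority order with one substring search per keyword, B makes a single left-to-right scan over the lowercased name, checking which keywords start at each position and folding their category ranks with min; the minimum rank (none = default 0) indexes the category table.
import Mathlib
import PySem

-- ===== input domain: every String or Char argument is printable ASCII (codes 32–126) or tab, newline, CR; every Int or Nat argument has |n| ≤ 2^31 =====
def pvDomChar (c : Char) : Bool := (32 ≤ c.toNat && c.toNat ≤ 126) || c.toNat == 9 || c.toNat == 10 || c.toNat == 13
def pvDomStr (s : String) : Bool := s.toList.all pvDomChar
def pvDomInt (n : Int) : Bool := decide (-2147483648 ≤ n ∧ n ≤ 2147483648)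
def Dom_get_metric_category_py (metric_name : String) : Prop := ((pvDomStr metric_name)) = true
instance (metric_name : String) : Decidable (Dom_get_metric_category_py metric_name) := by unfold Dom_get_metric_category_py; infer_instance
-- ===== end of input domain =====

-- B replaces the priority if/elif substring chain by a single positional scan keeping the minimum matching category rank (alternative algorithm, same cost); proved equal everywhere.


-- ===== PORT A =====
def get_metric_category_py (metric_name : String) : String :=
  let name_lower := PySem.Str.lower metric_name
  if (["cpu", "memory", "performance", "response"].any (fun k => PySem.Str.isIn k name_lower)) then
    "performance"
  else if (["uptime", "availability", "downtime"].any (fun k => PySem.Str.isIn k name_lower)) then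
    "availability"
  else if (["health", "temperature", "error", "warning"].any (fun k => PySem.Str.isIn k name_lower)) then
    "health"
  else if (["maintenance", "repair", "service"].any (fun k => PySem.Str.isIn k name_lower)) then
    "maintenance"
  else if (["security", "auth", "login"].any (fun k => PySem.Str.isIn k name_lower)) then
    "security"
  else if (["cost", "budget", "expense"].any (fun k => PySem.Str.isIn k name_lower)) then
    "cost"
  else
    "performance"

-- ===== PORT B =====
-- (keyword, category rank) pairs, and the rank-indexed category table
def pvKwRanks : List (List Char × Nat) :=
  [("cpu".toList, 0), ("memory".toList, 0), ("performance".toList, 0), ("response".toList, 0),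
   ("uptime".toList, 1), ("availability".toList, 1), ("downtime".toList, 1),
   ("health".toList, 2), ("temperature".toList, 2), ("error".toList, 2), ("warning".toList, 2),
   ("maintenance".toList, 3), ("repair".toList, 3), ("service".toList, 3),
   ("security".toList, 4), ("auth".toList, 4), ("login".toList, 4),
   ("cost".toList, 5), ("budget".toList, 5), ("expense".toList, 5)]

def pvCategories : List String :=
  ["performance", "availability", "health", "maintenance", "security", "cost"]

-- inner loop body: s.startswith(kw, i) (exact: kw prefix of the suffix at i) and (best is None or rank < best)
def pvStep (s : List Char) (i : Nat) (best : Option Nat) (kr : List Char × Nat) : Option Nat :=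
  match best with
  | none => if kr.1.isPrefixOf (s.drop i) then some kr.2 else none
  | some m => if kr.1.isPrefixOf (s.drop i) && decide (kr.2 < m) then some kr.2 else some m

-- for i in range(len(s)): for kw, rank in _KEYWORD_RANKS: …
def pvScan (s : List Char) : Option Nat :=
  (List.range s.length).foldl (fun best i => pvKwRanks.foldl (pvStep s i) best) none

def get_metric_category_py_alt (metric_name : String) : String :=
  let s := (PySem.Str.lower metric_name).toList
  pvCategories.getD ((pvScan s).getD 0) "performance"

-- ===== PRECONDITION & SPEC =====
def Spec_get_metric_category_py (metric_name : String) (out : String) : Prop := out = get_metric_category_py_alt metric_name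
instance (metric_name : String) (out : String) : Decidable (Spec_get_metric_category_py metric_name out) := by unfold Spec_get_metric_category_py; infer_instance

-- ===== CLAIM (what is proved, stated in full; the proofs are below) =====
def Claim_equal_get_metric_category_py : Prop := ∀ (metric_name : String), Dom_get_metric_category_py metric_name → Spec_get_metric_category_py metric_name (get_metric_category_py metric_name)

-- ===== LEMMAS AND PROOFS =====

-- fold an element into an optional running minimum
def pvOmin : Option Nat → Nat → Option Nat
  | none, x => some x
  | some m, x => some (min m x)

-- category ranks of keywords starting at position i of s
def pvRanksAt (s : List Char) (i : Nat) : List Nat :=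
  (pvKwRanks.filter (fun kr => kr.1.isPrefixOf (s.drop i))).map (·.2)

-- all hit ranks over all positions
def pvVals (s : List Char) : List Nat :=
  (List.range s.length).flatMap (pvRanksAt s)

-- rank r has a keyword occurring as an infix of s
def pvMatched (s : List Char) (r : Nat) : Prop :=
  ∃ kr ∈ pvKwRanks, kr.2 = r ∧ kr.1 <:+: s

lemma pvStep_eq (s : List Char) (i : Nat) (b : Option Nat) (kr : List Char × Nat) :
    pvStep s i b kr = if kr.1.isPrefixOf (s.drop i) then pvOmin b kr.2 else b := by
  cases b with
  | none => simp [pvStep, pvOmin]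
  | some m =>
    simp only [pvStep, pvOmin, Bool.and_eq_true, decide_eq_true_eq]
    split_ifs with h1 h2 h3 <;> simp_all <;> omega

lemma pvStep_fun (s : List Char) (i : Nat) :
    pvStep s i = fun b kr => if kr.1.isPrefixOf (s.drop i) then pvOmin b kr.2 else b := by
  funext b kr; exact pvStep_eq s i b kr

lemma pvFoldl_filter_omin {α : Type} (g : α → Bool) (f : α → Nat) :
    ∀ (l : List α) (b : Option Nat),
      l.foldl (fun b x => if g x then pvOmin b (f x) else b) b
        = ((l.filter g).map f).foldl pvOmin b := by
  intro l
  induction l with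
  | nil => intro b; rfl
  | cons x l ih =>
    intro b
    by_cases h : g x = true <;> simp [h, ih]

lemma pvFoldl_flat {h : Nat → List Nat} :
    ∀ (l : List Nat) (b : Option Nat),
      l.foldl (fun b i => (h i).foldl pvOmin b) b = (l.flatMap h).foldl pvOmin b := by
  intro l
  induction l with
  | nil => intro b; rfl
  | cons x l ih => intro b; simp [List.flatMap_cons, List.foldl_append, ih]

lemma pvScan_eq_foldl (s : List Char) :
    pvScan s = (pvVals s).foldl pvOmin none := by
  unfold pvScan pvVals
  rw [← pvFoldl_flat]
  have hfun : (fun (best : Option Nat) i => pvKwRanks.foldl (pvStep s i) best)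
      = fun best i => (pvRanksAt s i).foldl pvOmin best := by
    funext b i
    rw [pvStep_fun s i, pvFoldl_filter_omin]
    rfl
  rw [hfun]

lemma pvFoldl_omin_char :
    ∀ (L : List Nat) (m : Nat), ∃ r, L.foldl pvOmin (some m) = some r ∧
      (r = m ∨ r ∈ L) ∧ r ≤ m ∧ ∀ y ∈ L, r ≤ y := by
  intro L
  induction L with
  | nil => intro m; exact ⟨m, rfl, Or.inl rfl, le_refl m, by simp⟩
  | cons x L ih =>
    intro m
    obtain ⟨r, hfold, hmem, hle, hall⟩ := ih (min m x)
    refine ⟨r, by simpa [pvOmin] using hfold, ?_, le_trans hle (min_le_left _ _), ?_⟩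
    · rcases hmem with h | h
      · rcases Nat.le_total m x with hx | hx
        · exact Or.inl (by omega)
        · exact Or.inr (by simp [h, Nat.min_eq_right hx])
      · exact Or.inr (List.mem_cons_of_mem _ h)
    · intro y hy
      rcases List.mem_cons.mp hy with h | h
      · exact h ▸ le_trans hle (min_le_right _ _)
      · exact hall y h

lemma pvScan_none_iff (s : List Char) : pvScan s = none ↔ pvVals s = [] := by
  rw [pvScan_eq_foldl]
  cases hv : pvVals s with
  | nil => simp
  | cons x L =>
    obtain ⟨r, hfold, _⟩ := pvFoldl_omin_char L x
    simp only [List.foldl_cons]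
    constructor
    · intro h; rw [show pvOmin none x = some x from rfl] at h; rw [hfold] at h; cases h
    · intro h; cases h

lemma pvScan_some (s : List Char) (r : Nat) (h : pvScan s = some r) :
    r ∈ pvVals s ∧ ∀ y ∈ pvVals s, r ≤ y := by
  rw [pvScan_eq_foldl] at h
  cases hv : pvVals s with
  | nil => rw [hv] at h; cases h
  | cons x L =>
    rw [hv] at h
    obtain ⟨r', hfold, hmem, hle, hall⟩ := pvFoldl_omin_char L x
    simp only [List.foldl_cons, show pvOmin none x = some x from rfl, hfold] at h
    cases h
    constructor
    · rcases hmem with h | h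
      · exact h ▸ List.mem_cons_self
      · exact List.mem_cons_of_mem _ h
    · intro y hy
      rcases List.mem_cons.mp hy with h | h
      · exact h ▸ hle
      · exact hall y h

lemma pvKw_nonempty : ∀ kr ∈ pvKwRanks, kr.1 ≠ [] := by decide

lemma pvKw_rank_lt : ∀ kr ∈ pvKwRanks, kr.2 < 6 := by decide

lemma pvMem_vals_iff (s : List Char) (r : Nat) : r ∈ pvVals s ↔ pvMatched s r := by
  unfold pvVals pvRanksAt pvMatched
  simp only [List.mem_flatMap, List.mem_range, List.mem_map, List.mem_filter]
  constructor
  · rintro ⟨i, hi, kr, ⟨hkr, hpre⟩, hr⟩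
    refine ⟨kr, hkr, hr, ?_⟩
    obtain ⟨t, ht⟩ := (List.isPrefixOf_iff_prefix.mp hpre)
    exact ⟨s.take i, t, by rw [List.append_assoc, ht, List.take_append_drop]⟩
  · rintro ⟨kr, hkr, hr, hinf⟩
    have hin : PySem.Chars.isIn kr.1 s = true := (PySem.Chars.isIn_iff_infix kr.1 s).mpr hinf
    obtain ⟨j, hj⟩ := (PySem.Chars.exists_prefix_drop_iff_isIn kr.1 s).mpr hin
    have hjlen : j < s.length := by
      by_contra hge
      have : s.drop j = [] := List.drop_eq_nil_of_le (by omega)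
      rw [this] at hj
      exact pvKw_nonempty kr hkr (List.prefix_nil.mp hj)
    exact ⟨j, hjlen, kr, ⟨hkr, List.isPrefixOf_iff_prefix.mpr hj⟩, hr⟩

-- A's branch-k condition in terms of pvMatched (s = name_lower.toList)
lemma pvMatched_iff_any (nl : String) (k : Nat) (kws : List String)
    (hk : (pvKwRanks.filter (fun kr => kr.2 = k)).map (·.1) = kws.map String.toList) :
    (pvMatched nl.toList k ↔ kws.any (fun kw => PySem.Str.isIn kw nl) = true) := by
  constructor
  · rintro ⟨kr, hkr, hr, hinf⟩
    have : kr.1 ∈ kws.map String.toList := by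
      rw [← hk]
      exact List.mem_map.mpr ⟨kr, List.mem_filter.mpr ⟨hkr, by simp [hr]⟩, rfl⟩
    obtain ⟨kw, hkw, hkweq⟩ := List.mem_map.mp this
    refine List.any_eq_true.mpr ⟨kw, hkw, ?_⟩
    rw [PySem.Str.isIn_iff_infix kw nl, hkweq]
    exact hinf
  · intro h
    obtain ⟨kw, hkw, hin⟩ := List.any_eq_true.mp h
    have : kw.toList ∈ (pvKwRanks.filter (fun kr => kr.2 = k)).map (·.1) := by
      rw [hk]; exact List.mem_map.mpr ⟨kw, hkw, rfl⟩
    obtain ⟨kr, hkrf, hkr1⟩ := List.mem_map.mp this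
    obtain ⟨hkr, hrk⟩ := List.mem_filter.mp hkrf
    exact ⟨kr, hkr, by simpa using hrk, hkr1 ▸ ((PySem.Str.isIn_iff_infix kw nl).mp hin)⟩

-- ===== VERDICT (by name: the statement is the Claim_ definition above) =====
theorem get_metric_category_py_spec : Claim_equal_get_metric_category_py := by
  intro metric_name _
  unfold Spec_get_metric_category_py get_metric_category_py get_metric_category_py_alt
  dsimp only
  set nl := PySem.Str.lower metric_name with hnl
  set s := nl.toList with hs
  have m0 := pvMatched_iff_any nl 0 ["cpu", "memory", "performance", "response"] (by decide)
  have m1 := pvMatched_iff_any nl 1 ["uptime", "availability", "downtime"] (by decide)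
  have m2 := pvMatched_iff_any nl 2 ["health", "temperature", "error", "warning"] (by decide)
  have m3 := pvMatched_iff_any nl 3 ["maintenance", "repair", "service"] (by decide)
  have m4 := pvMatched_iff_any nl 4 ["security", "auth", "login"] (by decide)
  have m5 := pvMatched_iff_any nl 5 ["cost", "budget", "expense"] (by decide)
  -- helper: if the least matched rank is k, pvScan s = some k
  have least : ∀ k : Nat, pvMatched s k → (∀ j < k, ¬ pvMatched s j) →
      pvScan s = some k := by
    intro k hk hlt
    cases hscan : pvScan s with
    | none =>
      exact absurd ((pvMem_vals_iff s k).mpr hk)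
        (by rw [(pvScan_none_iff s).mp hscan]; simp)
    | some r =>
      obtain ⟨hmem, hall⟩ := pvScan_some s r hscan
      have hrm : pvMatched s r := (pvMem_vals_iff s r).mp hmem
      have hrk : r ≤ k := hall k ((pvMem_vals_iff s k).mpr hk)
      have : r = k := by
        rcases Nat.lt_or_ge r k with h | h
        · exact absurd hrm (hlt r h)
        · omega
      rw [this]
  have bt : ∀ k (kws : List String), (pvMatched s k ↔ (kws.any fun kw => PySem.Str.isIn kw nl) = true) →
      pvMatched s k → (kws.any fun kw => PySem.Str.isIn kw nl) = true := fun _ _ m h => m.mp h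
  have bf : ∀ k (kws : List String), (pvMatched s k ↔ (kws.any fun kw => PySem.Str.isIn kw nl) = true) →
      ¬ pvMatched s k → (kws.any fun kw => PySem.Str.isIn kw nl) = false := by
    intro k kws m h
    rw [← Bool.not_eq_true]
    exact fun hb => h (m.mpr hb)
  by_cases h0 : pvMatched s 0
  · rw [least 0 h0 (by omega), bt 0 _ m0 h0]
    simp [pvCategories]
  · have c0 := bf 0 _ m0 h0
    by_cases h1 : pvMatched s 1
    · rw [least 1 h1 (by intro j hj; interval_cases j; exact h0), c0, bt 1 _ m1 h1]
      simp [pvCategories]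
    · have c1 := bf 1 _ m1 h1
      by_cases h2 : pvMatched s 2
      · rw [least 2 h2 (by intro j hj; interval_cases j; exacts [h0, h1]), c0, c1, bt 2 _ m2 h2]
        simp [pvCategories]
      · have c2 := bf 2 _ m2 h2
        by_cases h3 : pvMatched s 3
        · rw [least 3 h3 (by intro j hj; interval_cases j; exacts [h0, h1, h2]), c0, c1, c2,
              bt 3 _ m3 h3]
          simp [pvCategories]
        · have c3 := bf 3 _ m3 h3
          by_cases h4 : pvMatched s 4
          · rw [least 4 h4 (by intro j hj; interval_cases j; exacts [h0, h1, h2, h3]), c0, c1, c2,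
                c3, bt 4 _ m4 h4]
            simp [pvCategories]
          · have c4 := bf 4 _ m4 h4
            by_cases h5 : pvMatched s 5
            · rw [least 5 h5 (by intro j hj; interval_cases j; exacts [h0, h1, h2, h3, h4]), c0,
                  c1, c2, c3, c4, bt 5 _ m5 h5]
              simp [pvCategories]
            · have c5 := bf 5 _ m5 h5
              have hnone : pvScan s = none := by
                rw [pvScan_none_iff]
                cases hv : pvVals s with
                | nil => rfl
                | cons x L =>
                  have hx : x ∈ pvVals s := by rw [hv]; simp
                  have hm : pvMatched s x := (pvMem_vals_iff s x).mp hx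
                  have hlt : x < 6 := by
                    obtain ⟨kr, hkr, hrk, _⟩ := hm
                    exact hrk ▸ pvKw_rank_lt kr hkr
                  interval_cases x
                  exacts [absurd hm h0, absurd hm h1, absurd hm h2, absurd hm h3,
                          absurd hm h4, absurd hm h5]
              rw [hnone, c0, c1, c2, c3, c4, c5]
              simp [pvCategories]
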